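-- pv_equiv track=rewrite | github.com/Shin-jay7/LeetCode | 0517_super_washing_machines.py | findMinMoves
-- ===== SOURCE A (Python) =====
-- from typing import List
--
-- def findMinMoves(machines: List[int]) -> int:
--     total, n = sum(machines), len(machines)
--     if total % n:
--         return -1
--     target, ans, to_right = total // n, 0, 0
--     # to_right: num of dresses to pass to the right machine
--     # dresses: num of dresses in the machine
--     for dresses in machines:
--         to_right = dresses + to_right - target
--         ans = max(ans, abs(to_right), dresses-target)
--
--     return ans
-- ===== SOURCE B (Python) =====
-- from typing import List
--
-- def findMinMoves(machines: List[int]) -> int: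
--     total, n = sum(machines), len(machines)
--     if total % n:
--         return -1
--     target = total // n
--
--     def feasible(x):
--         # can all machines be balanced with at most x moves?
--         carry = 0
--         for m in machines:
--             carry += m - target
--             if abs(carry) > x or m - target > x:
--                 return False
--         return True
--
--     # binary search for the least feasible number of moves
--     lo, hi = 0, sum(abs(m - target) for m in machines)
--     while lo < hi:
--         mid = (lo + hi) // 2
--         if feasible(mid):
--             hi = mid
--         else:
--             lo = mid + 1
--     return lo
-- ===== Notes on version B (the rewrite author's own statement) =====
-- stated objective: alternative
-- what changed: A computes the answer directly in one fused scan maximising |prefix carry| and single surplus; B instead binary-searches the least x for which an O(n) feasibility check (all |prefix carries| and surpluses bounded by x) succeeds.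
import Mathlib
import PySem

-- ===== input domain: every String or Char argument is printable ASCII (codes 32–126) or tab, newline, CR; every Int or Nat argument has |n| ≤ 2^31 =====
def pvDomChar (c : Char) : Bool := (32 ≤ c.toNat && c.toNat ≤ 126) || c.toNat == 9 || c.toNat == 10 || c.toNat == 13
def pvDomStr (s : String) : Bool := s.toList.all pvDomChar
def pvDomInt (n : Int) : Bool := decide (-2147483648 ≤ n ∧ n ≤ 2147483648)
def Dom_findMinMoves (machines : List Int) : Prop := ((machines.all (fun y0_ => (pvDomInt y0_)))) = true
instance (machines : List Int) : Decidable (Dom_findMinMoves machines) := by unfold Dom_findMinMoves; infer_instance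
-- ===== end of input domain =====

-- B replaces A's direct fused max-scan by a binary search for the least x passing a
-- feasibility check; equivalence is proved on nonempty lists (Pre_ excludes [], where both raise ZeroDivisionError).

-- ===== PORT A =====
def findMinMoves (machines : List Int) : Int :=
  let total := machines.sum
  let n : Int := machines.length
  if PySem.Int.mod total n ≠ 0 then -1
  else
    let target := PySem.Int.floordiv total n
    let st := machines.foldl
      (fun (s : Int × Int) dresses =>
        let to_right := dresses + s.2 - target
        (max s.1 (max |to_right| (dresses - target)), to_right))
      (0, 0)
    st.1

-- ===== PORT B =====
-- 'feasible' with its early returns, as structural recursion over the list with the carry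
def pvFeasible (target x : Int) : List Int → Int → Bool
  | [], _ => true
  | m :: rest, carry =>
    let c := carry + (m - target)
    if |c| > x ∨ m - target > x then false else pvFeasible target x rest c

-- the while-loop of the binary search
def pvBSearch (ok : Int → Bool) (lo hi : Int) : Int :=
  if h : lo < hi then
    let mid := PySem.Int.floordiv (lo + hi) 2
    if ok mid then pvBSearch ok lo mid else pvBSearch ok (mid + 1) hi
  else lo
termination_by (hi - lo).toNat
decreasing_by
  · have := PySem.Int.floordiv_two_mid_bounds (le_of_lt h)
    have hm : PySem.Int.floordiv (lo + hi) 2 < hi := by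
      rw [PySem.Int.floordiv_eq_ediv_of_pos (by omega : (0:Int) < 2)] at this ⊢
      omega
    omega
  · have := PySem.Int.floordiv_two_mid_bounds (le_of_lt h)
    have hm : lo ≤ PySem.Int.floordiv (lo + hi) 2 := this.1
    omega

def findMinMoves_alt (machines : List Int) : Int :=
  let total := machines.sum
  let n : Int := machines.length
  if PySem.Int.mod total n ≠ 0 then -1
  else
    let target := PySem.Int.floordiv total n
    let hi := (machines.map (fun m => |m - target|)).sum
    pvBSearch (fun x => pvFeasible target x machines 0) 0 hi

-- ===== PRECONDITION & SPEC =====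
-- Pre_ excludes the empty list, on which Python A raises ZeroDivisionError (total % n with n = 0).
def Pre_findMinMoves (machines : List Int) : Prop := machines ≠ []
instance (machines : List Int) : Decidable (Pre_findMinMoves machines) := by unfold Pre_findMinMoves; infer_instance
def pvWitness_findMinMoves : List Int := [4, 0, 0, 4]

def Spec_findMinMoves (machines : List Int) (out : Int) : Prop := out = findMinMoves_alt machines
instance (machines : List Int) (out : Int) : Decidable (Spec_findMinMoves machines out) := by unfold Spec_findMinMoves; infer_instance

-- ===== CLAIM =====
def Claim_equal_findMinMoves : Prop := ∀ (machines : List Int), Dom_findMinMoves machines → Pre_findMinMoves machines → Spec_findMinMoves machines (findMinMoves machines)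

-- ===== LEMMAS AND PROOFS =====

-- A's fold step, abstracted over target t
def fA (t : Int) (s : Int × Int) (d : Int) : Int × Int :=
  let r := d + s.2 - t
  (max s.1 (max |r| (d - t)), r)

-- max in A's accumulator pulls out of the fold
theorem foldA_max (t : Int) (l : List Int) : ∀ a b p,
    (l.foldl (fA t) (max a b, p)).1 = max a (l.foldl (fA t) (b, p)).1 := by
  induction l with
  | nil => intro a b p; simp
  | cons d l ih =>
    intro a b p
    simp only [List.foldl_cons, fA]
    rw [show max (max a b) (max |d + p - t| (d - t)) =
         max a (max b (max |d + p - t| (d - t))) from by omega]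
    exact ih a _ _

theorem foldA_nonneg (t : Int) (l : List Int) : ∀ a p, a ≤ (l.foldl (fA t) (a, p)).1 := by
  induction l with
  | nil => intro a p; simp
  | cons d l ih =>
    intro a p
    simp only [List.foldl_cons, fA]
    exact le_trans (le_max_left _ _) (ih _ _)

theorem sum_abs_nonneg (t : Int) (l : List Int) : 0 ≤ (l.map (fun m => |m - t|)).sum := by
  induction l with
  | nil => simp
  | cons d l ih => simp only [List.map_cons, List.sum_cons]; have := abs_nonneg (d - t); omega

-- the feasibility check decides exactly 'A's fold value ≤ x' (for 0 ≤ x)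
theorem feasible_iff (t x : Int) (hx : 0 ≤ x) (l : List Int) : ∀ carry,
    (pvFeasible t x l carry = true ↔ (l.foldl (fA t) (0, carry)).1 ≤ x) := by
  induction l with
  | nil => intro carry; simpa [pvFeasible] using hx
  | cons d l ih =>
    intro carry
    simp only [pvFeasible, List.foldl_cons, fA]
    have hc : d + carry - t = carry + (d - t) := by ring
    rw [hc]
    split_ifs with h
    · constructor
      · intro hf; exact absurd hf (by simp)
      · intro hle
        exfalso
        have h1 : max (0:Int) (max |carry + (d - t)| (d - t)) =
            max (max |carry + (d - t)| (d - t)) 0 := by omega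
        rw [h1, foldA_max] at hle
        omega
    · push_neg at h
      have h1 : max (0:Int) (max |carry + (d - t)| (d - t)) =
          max (max |carry + (d - t)| (d - t)) 0 := by omega
      rw [h1, foldA_max]
      rw [ih (carry + (d - t))]
      omega

-- A's fold value is bounded by the running |carry| plus the sum of absolute deviations
theorem foldA_bound (t : Int) (l : List Int) : ∀ a p,
    (l.foldl (fA t) (a, p)).1 ≤ max a (|p| + (l.map (fun m => |m - t|)).sum) := by
  induction l with
  | nil => intro a p; simp
  | cons d l ih =>
    intro a p
    simp only [List.foldl_cons, fA, List.map_cons, List.sum_cons]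
    have h := ih (max a (max |d + p - t| (d - t))) (d + p - t)
    have habs : |d + p - t| ≤ |p| + |d - t| := by
      have := abs_add_le p (d - t); have h2 : d + p - t = p + (d - t) := by ring
      rw [h2]; exact this
    have hd : d - t ≤ |d - t| := le_abs_self _
    have hs := sum_abs_nonneg t l
    have hp := abs_nonneg p
    omega

-- binary search on a threshold predicate returns the threshold
theorem bsearch_correct (ok : Int → Bool) (M : Int) :
    ∀ (k : Nat) (lo hi : Int), (hi - lo).toNat ≤ k → lo ≤ M → M ≤ hi →
    (∀ x, lo ≤ x → x < hi → (ok x = true ↔ M ≤ x)) →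
    pvBSearch ok lo hi = M := by
  intro k
  induction k with
  | zero =>
    intro lo hi hk h1 h2 _
    rw [pvBSearch]
    have : ¬ lo < hi := by omega
    simp only [this, dite_false]
    omega
  | succ n ih =>
    intro lo hi hk h1 h2 hok
    rw [pvBSearch]
    split_ifs with h
    · set mid := PySem.Int.floordiv (lo + hi) 2 with hmid
      have heq : mid = (lo + hi) / 2 := by
        rw [hmid]; exact PySem.Int.floordiv_eq_ediv_of_pos (by omega : (0:Int) < 2)
      have hlt : mid < hi := by omega
      have hge : lo ≤ mid := by omega
      by_cases hc : ok mid = true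
      · simp only [hc, if_true]
        have hM : M ≤ mid := (hok mid hge hlt).mp hc
        exact ih lo mid (by omega) h1 hM (fun x hx1 hx2 => hok x hx1 (by omega))
      · simp only [hc]
        have hM : mid < M := by
          have := (hok mid hge hlt)
          by_contra hcon
          exact hc (this.mpr (by omega))
        exact ih (mid + 1) hi (by omega) (by omega) h2 (fun x hx1 hx2 => hok x (by omega) hx2)
    · omega

-- ===== VERDICT =====
theorem findMinMoves_spec : Claim_equal_findMinMoves := by
  intro machines _ hpre
  unfold Spec_findMinMoves findMinMoves findMinMoves_alt
  simp only
  split_ifs with h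
  · rfl
  · set t := PySem.Int.floordiv machines.sum machines.length with ht
    set M := (machines.foldl (fA t) (0, 0)).1 with hM
    set S := (machines.map (fun m => |m - t|)).sum with hS
    have hMnn : 0 ≤ M := foldA_nonneg t machines 0 0
    have hMS : M ≤ S := by
      have := foldA_bound t machines 0 0
      simp only [abs_zero, zero_add] at this
      have hs := sum_abs_nonneg t machines
      omega
    show M = pvBSearch (fun x => pvFeasible t x machines 0) 0 S
    refine (bsearch_correct _ M (S - 0).toNat 0 S (le_refl _) hMnn hMS ?_).symm
    intro x hx1 _
    exact feasible_iff t x hx1 machines 0
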